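-- pv_equiv track=rewrite | github.com/mtcazzolato/tgraph-spot | app/callmine_focus/callmine_focus.py | generate_feature_combinations
-- ===== SOURCE A (Python) =====
-- import itertools
--
-- def generate_feature_combinations(key_features, d=1):
--     """
--     Generate feature combinations with the
--     set of informed features
--
--     Parameters
--     ----------
--     key_features: array of str
--         features to be combined
--     d: int
--         dimensionality, i.e., the number of
--         features per combination
--     """
--     combinations = []
--     plot_dict = {}
--
--     for subset in itertools.combinations(key_features, r=d):
--         combinations.append(list(subset)[:])
--
--     for i, c in enumerate(combinations):
--         plot_dict[i] = c
--
--     return combinations, plot_dict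
-- ===== SOURCE B (Python) =====
-- def generate_feature_combinations(key_features, d=1):
--     feats = list(key_features)
--     n = len(feats)
--
--     def rec(start, k):
--         # all k-length combinations of feats[start:], lexicographic by index
--         if k == 0:
--             return [[]]
--         out = []
--         for i in range(start, n - k + 1):
--             for tail in rec(i + 1, k - 1):
--                 out.append([feats[i]] + tail)
--         return out
--
--     combinations = rec(0, d) if d >= 0 else []
--     plot_dict = dict(enumerate(combinations))
--     return combinations, plot_dict
-- ===== Notes on version B (the rewrite author's own statement) =====
-- stated objective: alternative
-- what changed: Replaces the itertools.combinations call with a self-contained recursive generator over increasing indices into the materialized feature list, and builds plot_dict via dict(enumerate(...)) instead of an explicit enumerate loop.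
import Mathlib
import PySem

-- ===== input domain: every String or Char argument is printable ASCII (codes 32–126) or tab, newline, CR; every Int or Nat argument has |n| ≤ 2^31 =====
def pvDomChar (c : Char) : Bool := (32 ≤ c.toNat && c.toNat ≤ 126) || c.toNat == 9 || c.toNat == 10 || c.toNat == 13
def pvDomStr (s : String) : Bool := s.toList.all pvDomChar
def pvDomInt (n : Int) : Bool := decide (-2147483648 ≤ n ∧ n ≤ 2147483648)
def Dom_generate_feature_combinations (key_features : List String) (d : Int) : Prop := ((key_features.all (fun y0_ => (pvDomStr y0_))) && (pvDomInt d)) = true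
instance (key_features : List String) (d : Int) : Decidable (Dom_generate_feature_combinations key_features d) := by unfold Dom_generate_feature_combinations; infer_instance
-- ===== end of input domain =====

-- B replaces the itertools.combinations call by a self-contained recursive index generator; objective: alternative (self-contained, same cost).

-- ===== PORT A =====
def generate_feature_combinations (key_features : List String) (d : Int) : List (List String) × (List (Int × List String)) :=
  if d < 0 then ([], [])  -- itertools.combinations raises ValueError here; excluded by Pre_
  else
    -- for subset in itertools.combinations(key_features, r=d): combinations.append(list(subset)[:])
    let combinations : List (List String) :=
      (PySem.List.combinations key_features d.toNat).foldl (fun acc s => acc ++ [s]) []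
    -- for i, c in enumerate(combinations): plot_dict[i] = c
    let plot_dict : PySem.Dict Int (List String) :=
      (PySem.List.enumerate combinations 0).foldl (fun dd ic => dd.insert ic.1 ic.2) PySem.Dict.empty
    (combinations, plot_dict.items)

-- ===== PORT B =====
-- rec(start, k): all k-length combinations of feats[start:], lexicographic by index
def recB (feats : List String) (k : Nat) (start : Nat) : List (List String) :=
  match k with
  | 0 => [[]]
  | kk + 1 =>
    -- for i in range(start, n - k + 1): for tail in rec(i+1, k-1): out.append([feats[i]] + tail)
    -- (feats[i] ported as getD: i < feats.length on every iteration, so exact)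
    (List.range' start (feats.length - kk - start)).foldl
      (fun out i =>
        (recB feats kk (i + 1)).foldl (fun out2 tail => out2 ++ [feats.getD i "" :: tail]) out)
      []

def generate_feature_combinations_alt (key_features : List String) (d : Int) : List (List String) × (List (Int × List String)) :=
  let combinations : List (List String) := if d ≥ 0 then recB key_features d.toNat 0 else []
  let plot_dict : PySem.Dict Int (List String) :=
    PySem.Dict.ofList (PySem.List.enumerate combinations 0)
  (combinations, plot_dict.items)

-- ===== PRECONDITION & SPEC =====
-- Pre_ excludes d < 0, on which A raises ValueError (itertools.combinations).
def Pre_generate_feature_combinations (key_features : List String) (d : Int) : Prop := 0 ≤ d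
instance (key_features : List String) (d : Int) : Decidable (Pre_generate_feature_combinations key_features d) := by unfold Pre_generate_feature_combinations; infer_instance
def pvWitness_generate_feature_combinations : List String × Int := (["a", "b", "c"], 2)

def Spec_generate_feature_combinations (key_features : List String) (d : Int) (out : List (List String) × (List (Int × List String))) : Prop := out = generate_feature_combinations_alt key_features d
instance (key_features : List String) (d : Int) (out : List (List String) × (List (Int × List String))) : Decidable (Spec_generate_feature_combinations key_features d out) := by unfold Spec_generate_feature_combinations; infer_instance

-- ===== CLAIM (what is proved, stated in full; the proofs are below) =====
def Claim_equal_generate_feature_combinations : Prop := ∀ (key_features : List String) (d : Int), Dom_generate_feature_combinations key_features d → Pre_generate_feature_combinations key_features d → Spec_generate_feature_combinations key_features d (generate_feature_combinations key_features d)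

-- ===== LEMMAS AND PROOFS =====

-- the flatMap form of B's outer loop equals Python's combinations of the suffix
lemma flat_eq (feats : List String) (kk : Nat) :
    ∀ c start, c = feats.length - kk - start →
    (List.range' start c).flatMap
        (fun i => (PySem.List.combinations (feats.drop (i + 1)) kk).map (feats.getD i "" :: ·))
      = PySem.List.combinations (feats.drop start) (kk + 1) := by
  intro c
  induction c with
  | zero =>
    intro start h
    have hlen : (feats.drop start).length < kk + 1 := by
      simp only [List.length_drop]; omega
    simp [PySem.List.combinations_eq_nil_of_length_lt (xs := feats.drop start) hlen]
  | succ cc ih =>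
    intro start h
    have hs : start < feats.length := by omega
    have hdrop : feats.drop start = feats[start] :: feats.drop (start + 1) :=
      List.drop_eq_getElem_cons hs
    have hget : feats.getD start "" = feats[start] := List.getD_eq_getElem _ _ hs
    rw [List.range'_succ, List.flatMap_cons, hdrop,
        PySem.List.combinations_cons_succ, ih (start + 1) (by omega), hget]

lemma recB_eq (feats : List String) :
    ∀ k start, recB feats k start = PySem.List.combinations (feats.drop start) k := by
  intro k
  induction k with
  | zero => intro start; simp [recB, PySem.List.combinations_zero]
  | succ kk ih =>
    intro start
    show (List.range' start (feats.length - kk - start)).foldl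
        (fun out i =>
          (recB feats kk (i + 1)).foldl (fun out2 tail => out2 ++ [feats.getD i "" :: tail]) out)
        [] = _
    simp only [ih, PySem.List.foldl_append_eq_flatMap, List.nil_append,
      ← List.map_eq_flatMap]
    exact flat_eq feats kk _ start rfl

-- ===== VERDICT (by name: the statement is the Claim_ definition above) =====
theorem generate_feature_combinations_spec : Claim_equal_generate_feature_combinations := by
  intro key_features d _ hpre
  unfold Spec_generate_feature_combinations generate_feature_combinations generate_feature_combinations_alt
  have hd : ¬ d < 0 := not_lt.mpr hpre
  simp only [if_neg hd, if_pos (le_of_not_gt hd)]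
  rw [PySem.List.foldl_append_singleton_eq_self, recB_eq]
  refine Prod.ext rfl ?_
  simp only [PySem.Dict.ofList, PySem.Dict.update]
  rfl
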